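-- pv_equiv track=rewrite | github.com/maria-pugacheva/LeetCode | src/python/_01_easy/_3033_modify-the-matrix.py | solution
-- ===== SOURCE A (Python) =====
-- from typing import List
--
-- def solution(matrix: List[List[int]]) -> List[List[int]]:
--     """Given a 0-indexed m x n integer matrix matrix, replace each
--     element with the value -1 with the maximum element in its respective
--     column.
--
--     Examples:
--         >>> solution([[3, -1], [5, 2]])
--         [[3, 2], [5, 2]]
--         >>> solution([[1, 2, -1], [4, -1, 6], [7, 8, 9]])
--         [[1, 2, 9], [4, 8, 6], [7, 8, 9]]
--     """
--     m, n = len(matrix), len(matrix[0])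
--     for r in range(n):
--         mx = -1
--         for c in range(m):
--             mx = max(mx, matrix[c][r])
--         for j in range(m):
--             if matrix[j][r] == -1:
--                 matrix[j][r] = mx
--     return matrix
-- ===== SOURCE B (Python) =====
-- def solution(matrix):
--     # One row-major streaming pass: keep a running vector of column maxima and a
--     # sparse list of the (-1)-cell positions; then patch only those cells in place.
--     n = len(matrix[0])
--     best = list(matrix[0])
--     holes = []
--     for i, row in enumerate(matrix):
--         best = [max(b, row[j]) for j, b in enumerate(best)]
--         holes.extend((i, j) for j in range(n) if row[j] == -1)
--     for i, j in holes:
--         matrix[i][j] = best[j]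
--     return matrix
-- ===== Notes on version B (the rewrite author's own statement) =====
-- stated objective: alternative
-- what changed: B makes one row-major streaming pass that simultaneously accumulates a running column-maxima vector and a sparse list of the (-1)-cell positions, then patches only those recorded cells in place, instead of A's per-column loop that for each column runs a full max-scan and then a full replacement rescan of all rows; B never rescans the matrix looking for -1.
import Mathlib
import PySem

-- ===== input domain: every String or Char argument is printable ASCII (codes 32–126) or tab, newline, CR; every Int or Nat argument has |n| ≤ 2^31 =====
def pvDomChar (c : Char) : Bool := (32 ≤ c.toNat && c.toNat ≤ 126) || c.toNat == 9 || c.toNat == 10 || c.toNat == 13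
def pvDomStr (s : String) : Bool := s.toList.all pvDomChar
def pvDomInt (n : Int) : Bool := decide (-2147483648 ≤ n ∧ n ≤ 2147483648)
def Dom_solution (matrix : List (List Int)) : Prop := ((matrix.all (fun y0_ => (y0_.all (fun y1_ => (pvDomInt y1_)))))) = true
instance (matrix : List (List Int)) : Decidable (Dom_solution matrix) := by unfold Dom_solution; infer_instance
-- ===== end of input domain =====

-- B replaces A's per-column compute-then-rescan loops by one row-major streaming pass that
-- accumulates a running column-maxima vector and a sparse list of the (-1)-cell positions,
-- then patches exactly those cells; like A it mutates the argument in place in Python.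

-- ===== PORT A =====
def solution (matrix : List (List Int)) : List (List Int) :=
  match PySem.List.pyGet? matrix 0 with
  | none => []   -- Python raises IndexError on matrix[0] here; excluded by Pre_solution
  | some row0 =>
    let m : Int := (matrix.length : Int)
    let n : Int := (row0.length : Int)
    (PySem.List.pyRange 0 n).foldl (fun mat r =>
      let mx := (PySem.List.pyRange 0 m).foldl
        (fun mx c => max mx (PySem.List.pyGetD (PySem.List.pyGetD mat c []) r 0)) (-1)
      (PySem.List.pyRange 0 m).foldl
        (fun mat2 j =>
          if PySem.List.pyGetD (PySem.List.pyGetD mat2 j []) r 0 = -1 then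
            PySem.List.pySetD mat2 j (PySem.List.pySetD (PySem.List.pyGetD mat2 j []) r mx)
          else mat2) mat) matrix

-- ===== PORT B =====
def solution_alt (matrix : List (List Int)) : List (List Int) :=
  match PySem.List.pyGet? matrix 0 with
  | none => []   -- Python raises IndexError on matrix[0] here; excluded by Pre_solution
  | some row0 =>
    let n : Int := (row0.length : Int)
    -- single row-major pass: (best, holes) accumulator
    let st := (PySem.List.enumerate matrix 0).foldl
      (fun (st : List Int × List (Int × Int)) p =>
        ((PySem.List.enumerate st.1 0).map (fun q => max q.2 (PySem.List.pyGetD p.2 q.1 0)),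
         st.2 ++ ((PySem.List.pyRange 0 n).filter
             (fun j => PySem.List.pyGetD p.2 j 0 == -1)).map (fun j => (p.1, j))))
      (row0, ([] : List (Int × Int)))
    -- patch only the recorded holes
    st.2.foldl (fun mat pr =>
      PySem.List.pySetD mat pr.1
        (PySem.List.pySetD (PySem.List.pyGetD mat pr.1 []) pr.2 (PySem.List.pyGetD st.1 pr.2 0)))
      matrix

-- ===== PRECONDITION & SPEC =====
-- Pre_ excludes exactly the inputs on which A raises IndexError: the empty matrix (matrix[0])
-- and ragged matrices with a row shorter than the first row (matrix[c][r]).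
def Pre_solution (matrix : List (List Int)) : Prop :=
  matrix ≠ [] ∧ ∀ row ∈ matrix, (matrix.headD []).length ≤ row.length
instance (matrix : List (List Int)) : Decidable (Pre_solution matrix) := by
  unfold Pre_solution; infer_instance
def pvWitness_solution : List (List Int) := [[3, -1], [5, 2]]

def Spec_solution (matrix : List (List Int)) (out : List (List Int)) : Prop := out = solution_alt matrix
instance (matrix : List (List Int)) (out : List (List Int)) : Decidable (Spec_solution matrix out) := by unfold Spec_solution; infer_instance

-- ===== CLAIM (what is proved, stated in full; the proofs are below) =====
def Claim_equal_solution : Prop := ∀ (matrix : List (List Int)), Dom_solution matrix → Pre_solution matrix → Spec_solution matrix (solution matrix)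

-- ===== LEMMAS AND PROOFS =====

-- column maximum as A computes it (seeded with -1)
def cmax0 (M : List (List Int)) (j : Nat) : Int :=
  (M.map (fun row => row.getD j 0)).foldl max (-1)

-- the effect of A's first k outer iterations on one row
def aRow (M : List (List Int)) (k : Nat) (row : List Int) : List Int :=
  match k with
  | 0 => row
  | k + 1 =>
    let row' := aRow M k row
    if row'.getD k 0 = -1 then row'.set k (cmax0 M k) else row'

theorem aRow_length (M : List (List Int)) (k : Nat) (row : List Int) :
    (aRow M k row).length = row.length := by
  induction k with
  | zero => rfl
  | succ k ih => simp only [aRow]; split <;> simp [ih]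

theorem getD_set_int (l : List Int) (i j : Nat) (v : Int) (hi : i < l.length) :
    (l.set i v).getD j 0 = if j = i then v else l.getD j 0 := by
  by_cases h : j = i
  · subst h; simp [List.getD_eq_getElem?_getD, List.getElem?_set_self hi]
  · rw [List.getD_eq_getElem?_getD, List.getElem?_set,
      if_neg (fun he : i = j => h he.symm), if_neg h, ← List.getD_eq_getElem?_getD]

theorem aRow_getD (M : List (List Int)) (k : Nat) (row : List Int) :
    ∀ j, (aRow M k row).getD j 0 =
      if j < k ∧ row.getD j 0 = -1 then cmax0 M j else row.getD j 0 := by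
  induction k with
  | zero => intro j; simp [aRow]
  | succ k ih =>
    intro j
    simp only [aRow]
    have hcur : (aRow M k row).getD k 0 = row.getD k 0 := by rw [ih k]; simp
    by_cases hc : row.getD k 0 = -1
    · rw [hcur, if_pos hc]
      have hklen : k < row.length := by
        by_contra hh
        rw [not_lt] at hh
        rw [List.getD_eq_default _ _ hh] at hc
        exact absurd hc (by decide)
      rw [getD_set_int _ k j _ (by rw [aRow_length]; exact hklen)]
      by_cases hj : j = k
      · subst hj; rw [if_pos rfl, if_pos ⟨by omega, hc⟩]
      · rw [if_neg hj, ih j]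
        by_cases h1 : j < k ∧ row.getD j 0 = -1
        · rw [if_pos h1, if_pos ⟨by omega, h1.2⟩]
        · rw [if_neg h1, if_neg (by
            intro h2
            rcases Nat.lt_succ_iff_lt_or_eq.mp h2.1 with h3 | h3
            · exact h1 ⟨h3, h2.2⟩
            · exact hj h3)]
    · rw [hcur, if_neg hc, ih j]
      by_cases h1 : j < k ∧ row.getD j 0 = -1
      · rw [if_pos h1, if_pos ⟨by omega, h1.2⟩]
      · rw [if_neg h1, if_neg (by
          intro h2
          rcases Nat.lt_succ_iff_lt_or_eq.mp h2.1 with h3 | h3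
          · exact h1 ⟨h3, h2.2⟩
          · exact hc (h3 ▸ h2.2))]

-- A's max-scan over a column is a fold of max over the mapped column
theorem maxloop (mat : List (List Int)) (r : Int) :
    (PySem.List.pyRange 0 ((mat.length : Nat) : Int)).foldl
      (fun mx c => max mx (PySem.List.pyGetD (PySem.List.pyGetD mat c []) r 0)) (-1)
    = (mat.map (fun row => PySem.List.pyGetD row r 0)).foldl max (-1) := by
  rw [List.foldl_map]
  exact PySem.List.foldl_pyRange_zero_pyGetD' mat ([] : List Int)
    (fun acc row => max acc (PySem.List.pyGetD row r 0)) (-1)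

-- A's replacement scan over a column is a map over the rows: generalized invariant form
theorem updloop_gen (r : Int) (mx : Int) :
    ∀ (fuel k : Nat) (mat : List (List Int)), mat.length ≤ k + fuel →
    (PySem.List.pyRange ((k : Nat) : Int) ((mat.length : Nat) : Int)).foldl
      (fun mat2 j =>
        if PySem.List.pyGetD (PySem.List.pyGetD mat2 j []) r 0 = -1 then
          PySem.List.pySetD mat2 j (PySem.List.pySetD (PySem.List.pyGetD mat2 j []) r mx)
        else mat2) mat
    = mat.take k ++ (mat.drop k).map
        (fun row => if PySem.List.pyGetD row r 0 = -1 then PySem.List.pySetD row r mx else row) := by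
  intro fuel
  induction fuel with
  | zero =>
    intro k mat h
    rw [PySem.List.pyRange_one_eq_nil (by exact_mod_cast (by omega : mat.length ≤ k))]
    rw [List.foldl_nil, List.take_of_length_le (by omega), List.drop_eq_nil_of_le (by omega),
      List.map_nil, List.append_nil]
  | succ fuel ih =>
    intro k mat h
    by_cases hk : mat.length ≤ k
    · rw [PySem.List.pyRange_one_eq_nil (by exact_mod_cast hk)]
      rw [List.foldl_nil, List.take_of_length_le hk, List.drop_eq_nil_of_le hk,
        List.map_nil, List.append_nil]
    · rw [not_le] at hk
      rw [PySem.List.pyRange_one_cons (by exact_mod_cast hk)]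
      simp only [List.foldl_cons, PySem.List.pyGetD_natCast, PySem.List.pySetD_natCast]
      have hcast : ((k : Int) + 1) = (((k + 1 : Nat) : Nat) : Int) := by push_cast; ring
      by_cases hc : PySem.List.pyGetD (mat.getD k []) r 0 = -1
      · rw [if_pos hc]
        have hlen : (mat.set k (PySem.List.pySetD (mat.getD k []) r mx)).length = mat.length := by
          simp
        rw [show ((mat.length : Nat) : Int)
            = (((mat.set k (PySem.List.pySetD (mat.getD k []) r mx)).length : Nat) : Int) by
          rw [hlen], hcast, ih (k + 1) _ (by rw [hlen]; omega)]
        have h1 : (mat.set k (PySem.List.pySetD (mat.getD k []) r mx)).take (k + 1)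
            = mat.take k ++ [PySem.List.pySetD (mat.getD k []) r mx] := by
          rw [List.take_set, List.take_add_one, List.getElem?_eq_getElem hk, List.set_append]
          rw [if_neg (by simp [List.length_take])]
          have hz : k - (mat.take k).length = 0 := by simp only [List.length_take]; omega
          rw [hz]
          simp
        have h2 : (mat.set k (PySem.List.pySetD (mat.getD k []) r mx)).drop (k + 1)
            = mat.drop (k + 1) := by
          rw [List.drop_set, if_pos (by omega)]
        rw [h1, h2]
        rw [List.drop_eq_getElem_cons hk, List.map_cons,
          ← List.getD_eq_getElem mat ([] : List Int) hk, if_pos hc]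
        simp [List.append_assoc]
      · rw [if_neg hc]
        rw [hcast, ih (k + 1) mat (by omega)]
        rw [List.drop_eq_getElem_cons hk, List.map_cons,
          ← List.getD_eq_getElem mat ([] : List Int) hk, if_neg hc]
        rw [List.take_add_one, List.getElem?_eq_getElem hk,
          ← List.getD_eq_getElem mat ([] : List Int) hk]
        simp [List.append_assoc]

theorem updloop (r : Int) (mx : Int) (mat : List (List Int)) :
    (PySem.List.pyRange 0 ((mat.length : Nat) : Int)).foldl
      (fun mat2 j =>
        if PySem.List.pyGetD (PySem.List.pyGetD mat2 j []) r 0 = -1 then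
          PySem.List.pySetD mat2 j (PySem.List.pySetD (PySem.List.pyGetD mat2 j []) r mx)
        else mat2) mat
    = mat.map (fun row => if PySem.List.pyGetD row r 0 = -1 then PySem.List.pySetD row r mx else row) := by
  have h := updloop_gen r mx mat.length 0 mat (by omega)
  simpa using h

-- A's outer loop, processed up to column k
theorem outer (M : List (List Int)) (nn : Nat) :
    ∀ k : Nat, k ≤ nn →
    (PySem.List.pyRange 0 ((k : Nat) : Int)).foldl
      (fun mat r =>
        (PySem.List.pyRange 0 ((M.length : Nat) : Int)).foldl
          (fun mat2 j =>
            if PySem.List.pyGetD (PySem.List.pyGetD mat2 j []) r 0 = -1 then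
              PySem.List.pySetD mat2 j (PySem.List.pySetD (PySem.List.pyGetD mat2 j []) r
                ((PySem.List.pyRange 0 ((M.length : Nat) : Int)).foldl
                  (fun mx c => max mx (PySem.List.pyGetD (PySem.List.pyGetD mat c []) r 0)) (-1)))
            else mat2) mat) M
    = M.map (fun row => aRow M k row) := by
  intro k
  induction k with
  | zero =>
    intro _
    rw [show (((0 : Nat) : Nat) : Int) = (0 : Int) by norm_num,
      PySem.List.pyRange_one_eq_nil le_rfl, List.foldl_nil]
    simp [aRow]
  | succ k ih =>
    intro hk
    rw [show (((k + 1 : Nat) : Nat) : Int) = ((k : Int) + 1) by push_cast; ring,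
      PySem.List.pyRange_one_succ_right (by positivity)]
    simp only [List.foldl_append, List.foldl_cons, List.foldl_nil]
    rw [ih (by omega)]
    have hmatlen : ((M.length : Nat) : Int)
        = (((M.map (fun row => aRow M k row)).length : Nat) : Int) := by simp
    rw [hmatlen]
    have hmx : (PySem.List.pyRange 0 (((M.map (fun row => aRow M k row)).length : Nat) : Int)).foldl
        (fun mx c => max mx (PySem.List.pyGetD
          (PySem.List.pyGetD (M.map (fun row => aRow M k row)) c []) ((k : Int)) 0)) (-1)
        = cmax0 M k := by
      rw [maxloop]
      unfold cmax0
      rw [List.map_map]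
      congr 1
      apply List.map_congr_left
      intro row _
      simp only [Function.comp]
      rw [PySem.List.pyGetD_natCast, aRow_getD]
      simp
    rw [hmx, updloop ((k : Int)) (cmax0 M k) (M.map (fun row => aRow M k row))]
    rw [List.map_map]
    apply List.map_congr_left
    intro row _
    simp only [Function.comp]
    conv_rhs => rw [aRow]
    rw [PySem.List.pyGetD_natCast, PySem.List.pySetD_natCast]

theorem foldl_max_init (t : List Int) : ∀ a b : Int, t.foldl max (max a b) = max a (t.foldl max b) := by
  induction t with
  | nil => intro a b; rfl
  | cons y t ih =>
    intro a b
    simp only [List.foldl_cons]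
    rw [max_assoc, ih]

theorem enum_map_getElem? {β : Type} (f : Int × Int → β) :
    ∀ (row : List Int) (s : Int) (i : Nat), i < row.length →
      ((PySem.List.enumerate row s).map f)[i]? = some (f (s + i, row.getD i 0)) := by
  intro row
  induction row with
  | nil => intro s i h; exact absurd h (by simp)
  | cons x t ih =>
    intro s i hi
    rw [PySem.List.enumerate_cons, List.map_cons]
    cases i with
    | zero => simp
    | succ i =>
      rw [List.getElem?_cons_succ, ih (s + 1) i (by simpa using hi)]
      have e1 : s + 1 + (i : Int) = s + ((i + 1 : Nat) : Int) := by push_cast; ring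
      have e2 : t.getD i 0 = (x :: t).getD (i + 1) 0 := rfl
      rw [e1, e2]

-- ===== B-side lemmas =====

-- one streaming update of the best vector
def updB (row best : List Int) : List Int :=
  (PySem.List.enumerate best 0).map (fun q => max q.2 (PySem.List.pyGetD row q.1 0))

theorem updB_length (row best : List Int) : (updB row best).length = best.length := by
  simp [updB, PySem.List.length_enumerate]

theorem updB_getD (row best : List Int) (j : Nat) (hj : j < best.length) :
    (updB row best).getD j 0 = max (best.getD j 0) (row.getD j 0) := by
  have h := enum_map_getElem? (fun q : Int × Int => max q.2 (PySem.List.pyGetD row q.1 0)) best 0 j hj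
  rw [List.getD_eq_getElem?_getD]
  unfold updB
  rw [h]
  simp [PySem.List.pyGetD_natCast]

-- the best vector after the whole pass
def bestL (M : List (List Int)) (b : List Int) : List Int := M.foldl (fun b row => updB row b) b

theorem bestL_getD (M : List (List Int)) : ∀ (b : List Int) (j : Nat), j < b.length →
    (bestL M b).getD j 0 = M.foldl (fun a row => max a (row.getD j 0)) (b.getD j 0) := by
  induction M with
  | nil => intro b j _; rfl
  | cons r t ih =>
    intro b j hj
    simp only [bestL, List.foldl_cons]
    rw [show t.foldl (fun b row => updB row b) (updB r b) = bestL t (updB r b) from rfl,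
      ih (updB r b) j (by rw [updB_length]; exact hj), updB_getD r b j hj]

-- splitting the paired fold into its independent components
theorem foldl_pair_split {α β γ : Type} (f : α → β → β) (g : α → List γ) :
    ∀ (l : List α) (b0 : β) (h0 : List γ),
    l.foldl (fun st p => (f p st.1, st.2 ++ g p)) (b0, h0)
      = (l.foldl (fun b p => f p b) b0, h0 ++ l.flatMap g) := by
  intro l
  induction l with
  | nil => intro b0 h0; simp
  | cons x t ih => intro b0 h0; simp [ih, List.append_assoc]

-- the hole positions, in Nat form
def holesN (M : List (List Int)) (n : Nat) : List (Nat × Nat) :=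
  (List.range M.length).flatMap (fun i =>
    ((List.range n).filter (fun j => (M.getD i []).getD j 0 == -1)).map (fun j => (i, j)))

theorem mem_holesN (M : List (List Int)) (n : Nat) (i j : Nat) :
    (i, j) ∈ holesN M n ↔ i < M.length ∧ j < n ∧ (M.getD i []).getD j 0 = -1 := by
  simp only [holesN, List.mem_flatMap, List.mem_map, List.mem_filter, List.mem_range,
    beq_iff_eq, Prod.mk.injEq]
  constructor
  · rintro ⟨a, ha, b, ⟨hb, hv⟩, rfl, rfl⟩
    exact ⟨ha, hb, hv⟩
  · rintro ⟨hi, hj, hv⟩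
    exact ⟨i, hi, j, ⟨hj, hv⟩, rfl, rfl⟩

-- B's flat hole list equals holesN (cast to Int pairs)
theorem holes_eq (M : List (List Int)) (n : Nat) :
    (PySem.List.enumerate M 0).flatMap (fun p =>
      ((PySem.List.pyRange 0 ((n : Nat) : Int)).filter
          (fun j => PySem.List.pyGetD p.2 j 0 == -1)).map (fun j => (p.1, j)))
    = (holesN M n).map (fun q => ((q.1 : Int), (q.2 : Int))) := by
  rw [PySem.List.enumerate_eq_map_pyRange M ([] : List Int), List.flatMap_map]
  rw [show PySem.List.pyRange 0 (PySem.List.len M) = PySem.List.pyRange 0 ((M.length : Nat) : Int) by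
    simp [PySem.List.len]]
  unfold holesN
  rw [List.map_flatMap]
  rw [PySem.List.pyRange_one 0, PySem.List.pyRange_one 0]
  simp only [zero_add, Int.sub_zero, Int.toNat_natCast, List.flatMap_map, List.filter_map,
    Function.comp_def, PySem.List.pyGetD_natCast, List.map_map]

-- outer getD through List.set
theorem getD_set_self_row (mat : List (List Int)) (k : Nat) (v : List Int) (h : k < mat.length) :
    (mat.set k v).getD k [] = v := by
  rw [List.getD_eq_getElem?_getD, List.getElem?_set_self h]; rfl

theorem getD_set_ne_row (mat : List (List Int)) (k i : Nat) (v : List Int) (h : i ≠ k) :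
    (mat.set k v).getD i [] = mat.getD i [] := by
  rw [List.getD_eq_getElem?_getD, List.getElem?_set_ne (fun he => h he.symm),
    ← List.getD_eq_getElem?_getD]

-- the patch fold, characterized per index
theorem patch_char (best : List Int) :
    ∀ (H : List (Nat × Nat)) (mat : List (List Int)),
    (∀ p ∈ H, p.1 < mat.length ∧ p.2 < (mat.getD p.1 []).length) →
    (H.foldl (fun mat q => mat.set q.1 ((mat.getD q.1 []).set q.2 (best.getD q.2 0))) mat).length
        = mat.length
    ∧ (∀ i, ((H.foldl (fun mat q => mat.set q.1 ((mat.getD q.1 []).set q.2 (best.getD q.2 0)))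
          mat).getD i []).length = (mat.getD i []).length)
    ∧ (∀ i j, i < mat.length → j < (mat.getD i []).length →
        ((H.foldl (fun mat q => mat.set q.1 ((mat.getD q.1 []).set q.2 (best.getD q.2 0)))
            mat).getD i []).getD j 0
          = if (i, j) ∈ H then best.getD j 0 else (mat.getD i []).getD j 0) := by
  intro H
  induction H with
  | nil => intro mat _; refine ⟨rfl, fun i => rfl, fun i j _ _ => by simp⟩
  | cons q t ih =>
    intro mat hv
    obtain ⟨hq1, hq2⟩ := hv q List.mem_cons_self
    set mat1 := mat.set q.1 ((mat.getD q.1 []).set q.2 (best.getD q.2 0)) with hmat1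
    have hrow : ∀ i, (mat1.getD i []).length = (mat.getD i []).length := by
      intro i
      by_cases h : i = q.1
      · subst h
        rw [hmat1, getD_set_self_row _ _ _ hq1, List.length_set]
      · rw [hmat1, getD_set_ne_row _ _ _ _ h]
    have hlen1 : mat1.length = mat.length := by simp [hmat1]
    have hv' : ∀ p ∈ t, p.1 < mat1.length ∧ p.2 < (mat1.getD p.1 []).length := by
      intro p hp
      obtain ⟨h1, h2⟩ := hv p (List.mem_cons_of_mem _ hp)
      exact ⟨by rwa [hlen1], by rwa [hrow]⟩
    obtain ⟨ihl, ihr, ihv⟩ := ih mat1 hv'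
    refine ⟨?_, ?_, ?_⟩
    · rw [List.foldl_cons, ← hmat1, ihl, hlen1]
    · intro i; rw [List.foldl_cons, ← hmat1, ihr, hrow]
    · intro i j hi hj
      rw [List.foldl_cons, ← hmat1, ihv i j (by rwa [hlen1]) (by rwa [hrow])]
      have hm1 : (mat1.getD i []).getD j 0 =
          if i = q.1 ∧ j = q.2 then best.getD q.2 0 else (mat.getD i []).getD j 0 := by
        by_cases h : i = q.1
        · subst h
          rw [hmat1, getD_set_self_row _ _ _ hq1, getD_set_int _ _ _ _ hq2]
          by_cases hje : j = q.2
          · subst hje; simp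
          · rw [if_neg hje, if_neg (fun hh => hje hh.2)]
        · rw [if_neg (fun hh => h hh.1), hmat1, getD_set_ne_row _ _ _ _ h]
      rw [hm1]
      by_cases ht : (i, j) ∈ t
      · rw [if_pos ht, if_pos (List.mem_cons_of_mem _ ht)]
      · rw [if_neg ht]
        by_cases he : i = q.1 ∧ j = q.2
        · rw [if_pos he, if_pos (by rw [List.mem_cons]; left; rw [he.1, he.2]), he.2]
        · rw [if_neg he, if_neg (by
            rw [List.mem_cons]
            rintro (h1 | h1)
            · exact he ⟨congrArg Prod.fst h1, congrArg Prod.snd h1⟩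
            · exact ht h1)]

-- best value agrees with A's seeded column max wherever a -1 sits in the column
theorem best_eq_cmax0 (r0 : List Int) (rest : List (List Int)) (j : Nat) (hj : j < r0.length)
    (hneg : (-1 : Int) ∈ (r0 :: rest).map (fun row => row.getD j 0)) :
    (bestL (r0 :: rest) r0).getD j 0 = cmax0 (r0 :: rest) j := by
  rw [bestL_getD _ _ _ hj]
  unfold cmax0
  rw [← List.foldl_map (f := fun row : List Int => row.getD j 0) (g := max)]
  simp only [List.map_cons] at hneg ⊢
  rw [List.foldl_cons, List.foldl_cons, max_self, foldl_max_init]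
  refine (max_eq_right ?_).symm
  rcases List.mem_cons.mp hneg with h | h
  · rw [← h]
    exact (PySem.List.le_foldl_max (rest.map fun row => row.getD j 0) (-1)).1
  · exact (PySem.List.le_foldl_max (rest.map fun row => row.getD j 0) (r0.getD j 0)).2 _ h

-- ===== VERDICT (by name: the statement is the Claim_ definition above) =====
theorem solution_spec : Claim_equal_solution := by
  intro M _ hpre
  rcases hpre with ⟨hne, hall⟩
  obtain ⟨r0, rest, rfl⟩ := List.exists_cons_of_ne_nil hne
  simp only [List.headD_cons] at hall
  unfold Spec_solution
  have h0 : PySem.List.pyGet? (r0 :: rest) (0 : Int) = some r0 := by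
    rw [show (0 : Int) = ((0 : Nat) : Int) from rfl, PySem.List.pyGet?_natCast]
    rfl
  have hA : solution (r0 :: rest) =
      (PySem.List.pyRange 0 ((r0.length : Nat) : Int)).foldl
        (fun mat r =>
          (PySem.List.pyRange 0 (((r0 :: rest).length : Nat) : Int)).foldl
            (fun mat2 j =>
              if PySem.List.pyGetD (PySem.List.pyGetD mat2 j []) r 0 = -1 then
                PySem.List.pySetD mat2 j (PySem.List.pySetD (PySem.List.pyGetD mat2 j []) r
                  ((PySem.List.pyRange 0 (((r0 :: rest).length : Nat) : Int)).foldl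
                    (fun mx c => max mx (PySem.List.pyGetD (PySem.List.pyGetD mat c []) r 0)) (-1)))
              else mat2) mat) (r0 :: rest) := by
    unfold solution
    rw [h0]
  have hbest : (PySem.List.enumerate (r0 :: rest) 0).foldl
      (fun b p => (PySem.List.enumerate b 0).map (fun q => max q.2 (PySem.List.pyGetD p.2 q.1 0))) r0
      = bestL (r0 :: rest) r0 := by
    rw [bestL]
    conv_rhs => rw [← PySem.List.map_snd_enumerate (r0 :: rest) 0]
    rw [List.foldl_map]
    simp only [updB]
  have hB : solution_alt (r0 :: rest)
      = (holesN (r0 :: rest) r0.length).foldl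
          (fun mat q => mat.set q.1 ((mat.getD q.1 []).set q.2 ((bestL (r0 :: rest) r0).getD q.2 0)))
          (r0 :: rest) := by
    unfold solution_alt
    rw [h0]
    simp only []
    rw [foldl_pair_split
      (fun (p : Int × List Int) (b : List Int) =>
        (PySem.List.enumerate b 0).map (fun q => max q.2 (PySem.List.pyGetD p.2 q.1 0)))
      (fun p => ((PySem.List.pyRange 0 ((r0.length : Nat) : Int)).filter
          (fun j => PySem.List.pyGetD p.2 j 0 == -1)).map (fun j => (p.1, j)))]
    simp only [List.nil_append]
    rw [holes_eq (r0 :: rest) r0.length, hbest]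
    simp only [List.foldl_map, PySem.List.pySetD_natCast, PySem.List.pyGetD_natCast]
  have hvalid : ∀ p ∈ holesN (r0 :: rest) r0.length,
      p.1 < (r0 :: rest).length ∧ p.2 < ((r0 :: rest).getD p.1 []).length := by
    rintro ⟨i, j⟩ hp
    rw [mem_holesN] at hp
    obtain ⟨hi, hj, _⟩ := hp
    refine ⟨hi, lt_of_lt_of_le hj ?_⟩
    refine hall _ ?_
    rw [List.getD_eq_getElem _ _ hi]
    exact List.getElem_mem _
  obtain ⟨hlen, hrowlen, hval⟩ :=
    patch_char (bestL (r0 :: rest) r0) (holesN (r0 :: rest) r0.length) (r0 :: rest) hvalid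
  rw [hA, outer (r0 :: rest) r0.length r0.length le_rfl, hB]
  apply List.ext_getElem
  · simp only [List.length_map]
    exact hlen.symm
  · intro i h1 h2
    have hi : i < (r0 :: rest).length := by simpa using h1
    rw [List.getElem_map]
    rw [show ((holesN (r0 :: rest) r0.length).foldl
        (fun mat q => mat.set q.1 ((mat.getD q.1 []).set q.2 ((bestL (r0 :: rest) r0).getD q.2 0)))
        (r0 :: rest))[i] = ((holesN (r0 :: rest) r0.length).foldl
        (fun mat q => mat.set q.1 ((mat.getD q.1 []).set q.2 ((bestL (r0 :: rest) r0).getD q.2 0)))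
        (r0 :: rest)).getD i [] from (List.getD_eq_getElem _ _ h2).symm]
    rw [show (r0 :: rest)[i] = (r0 :: rest).getD i [] from (List.getD_eq_getElem _ _ hi).symm]
    apply List.ext_getElem
    · rw [aRow_length, hrowlen i]
    · intro j hj1 hj2
      have hjD : j < ((r0 :: rest).getD i []).length := by rwa [aRow_length] at hj1
      rw [show (aRow (r0 :: rest) r0.length ((r0 :: rest).getD i []))[j]
          = (aRow (r0 :: rest) r0.length ((r0 :: rest).getD i [])).getD j 0
          from (List.getD_eq_getElem _ _ hj1).symm]
      rw [show (((holesN (r0 :: rest) r0.length).foldl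
          (fun mat q => mat.set q.1 ((mat.getD q.1 []).set q.2 ((bestL (r0 :: rest) r0).getD q.2 0)))
          (r0 :: rest)).getD i [])[j]
          = (((holesN (r0 :: rest) r0.length).foldl
          (fun mat q => mat.set q.1 ((mat.getD q.1 []).set q.2 ((bestL (r0 :: rest) r0).getD q.2 0)))
          (r0 :: rest)).getD i []).getD j 0 from (List.getD_eq_getElem _ _ hj2).symm]
      rw [aRow_getD, hval i j hi hjD]
      by_cases hc : j < r0.length ∧ ((r0 :: rest).getD i []).getD j 0 = -1
      · have hmem : (i, j) ∈ holesN (r0 :: rest) r0.length :=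
          (mem_holesN _ _ _ _).mpr ⟨hi, hc.1, hc.2⟩
        rw [if_pos hc, if_pos hmem]
        refine (best_eq_cmax0 r0 rest j hc.1 ?_).symm
        refine List.mem_map.mpr ⟨(r0 :: rest).getD i [], ?_, hc.2⟩
        rw [List.getD_eq_getElem _ _ hi]
        exact List.getElem_mem _
      · have hmem : (i, j) ∉ holesN (r0 :: rest) r0.length := by
          rw [mem_holesN]
          exact fun hh => hc ⟨hh.2.1, hh.2.2⟩
        rw [if_neg hc, if_neg hmem]
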